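-- pv_equiv track=rewrite | github.com/tunman555/fdp_volume | utils.py | add_start_end
-- ===== SOURCE A (Python) =====
-- def add_start_end(arc_list,start_point,end_point):
-- 	x,y = [],[]
-- 	x.append(start_point[0])
-- 	y.append(start_point[1])
--
-- 	for i in arc_list:
-- 	    x.append(i[0])
-- 	    y.append(i[1])
--
--
-- 	x.append(end_point[0])
-- 	y.append(end_point[1])
-- 	return (x,y)
-- ===== SOURCE B (Python) =====
-- def add_start_end(arc_list, start_point, end_point):
--     def build(pts):
--         # recursively build both coordinate lists back-to-front, ending with end_point
--         if not pts:
--             return ([end_point[0]], [end_point[1]])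
--         xs, ys = build(pts[1:])
--         return ([pts[0][0]] + xs, [pts[0][1]] + ys)
--     xs, ys = build(list(arc_list))
--     return ([start_point[0]] + xs, [start_point[1]] + ys)
-- ===== Notes on version B (the rewrite author's own statement) =====
-- stated objective: alternative
-- what changed: Replaces A's iterative append-to-the-back loop over two growing lists with a structural recursion that builds both coordinate lists back-to-front by consing, seeding the recursion with the end point and prepending the start point last.
import Mathlib
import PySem

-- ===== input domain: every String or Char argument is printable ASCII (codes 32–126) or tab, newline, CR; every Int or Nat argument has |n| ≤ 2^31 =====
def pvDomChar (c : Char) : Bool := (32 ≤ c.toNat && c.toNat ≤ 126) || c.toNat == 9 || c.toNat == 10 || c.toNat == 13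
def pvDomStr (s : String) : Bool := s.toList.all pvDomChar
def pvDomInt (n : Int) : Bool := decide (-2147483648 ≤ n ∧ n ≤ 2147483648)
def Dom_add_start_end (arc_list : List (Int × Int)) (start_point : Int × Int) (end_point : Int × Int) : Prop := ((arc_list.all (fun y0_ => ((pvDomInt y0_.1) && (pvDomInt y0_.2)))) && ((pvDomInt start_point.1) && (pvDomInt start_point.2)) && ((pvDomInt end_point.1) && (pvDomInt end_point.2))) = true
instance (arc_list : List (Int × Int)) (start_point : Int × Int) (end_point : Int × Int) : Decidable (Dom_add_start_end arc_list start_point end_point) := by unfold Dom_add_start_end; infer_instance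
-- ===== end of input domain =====

-- B replaces A's iterative append-to-the-back loop with a structural recursion that builds both
-- coordinate lists back-to-front by consing (seeded with the end point, start point prepended last).

-- ===== PORT A =====
def add_start_end (arc_list : List (Int × Int)) (start_point : Int × Int) (end_point : Int × Int) : List Int × List Int :=
  -- x,y = [],[]; x.append(start_point[0]); y.append(start_point[1])
  let x : List Int := [] ++ [start_point.1]
  let y : List Int := [] ++ [start_point.2]
  -- for i in arc_list: x.append(i[0]); y.append(i[1])
  let xy := arc_list.foldl (fun (acc : List Int × List Int) i => (acc.1 ++ [i.1], acc.2 ++ [i.2])) (x, y)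
  -- x.append(end_point[0]); y.append(end_point[1]); return (x,y)
  (xy.1 ++ [end_point.1], xy.2 ++ [end_point.2])

-- ===== PORT B =====
-- build(pts): recursion consing each point's coordinates onto the lists built from the tail,
-- base case seeds with the end point.
def add_start_end_build (end_point : Int × Int) : List (Int × Int) → List Int × List Int
  | [] => ([end_point.1], [end_point.2])
  | p :: rest =>
    let xy := add_start_end_build end_point rest
    (p.1 :: xy.1, p.2 :: xy.2)

def add_start_end_alt (arc_list : List (Int × Int)) (start_point : Int × Int) (end_point : Int × Int) : List Int × List Int :=
  let xy := add_start_end_build end_point arc_list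
  (start_point.1 :: xy.1, start_point.2 :: xy.2)

-- ===== PRECONDITION & SPEC =====
def Spec_add_start_end (arc_list : List (Int × Int)) (start_point : Int × Int) (end_point : Int × Int) (out : List Int × List Int) : Prop := out = add_start_end_alt arc_list start_point end_point
instance (arc_list : List (Int × Int)) (start_point : Int × Int) (end_point : Int × Int) (out : List Int × List Int) : Decidable (Spec_add_start_end arc_list start_point end_point out) := by unfold Spec_add_start_end; infer_instance

-- ===== CLAIM =====
def Claim_equal_add_start_end : Prop := ∀ (arc_list : List (Int × Int)) (start_point : Int × Int) (end_point : Int × Int), Dom_add_start_end arc_list start_point end_point → Spec_add_start_end arc_list start_point end_point (add_start_end arc_list start_point end_point)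

-- ===== LEMMAS AND PROOFS =====
-- A's loop from any accumulator appends the coordinates; B's recursion conses them in front of
-- the end point's coordinates. Both characterised against the same append form.
theorem add_start_end_foldl (arc_list : List (Int × Int)) (x0 y0 : List Int) :
    arc_list.foldl (fun (acc : List Int × List Int) i => (acc.1 ++ [i.1], acc.2 ++ [i.2])) (x0, y0)
      = (x0 ++ arc_list.map (fun p => p.1), y0 ++ arc_list.map (fun p => p.2)) := by
  induction arc_list generalizing x0 y0 with
  | nil => simp
  | cons h t ih => simp [List.foldl, ih]

theorem add_start_end_build_eq (end_point : Int × Int) (pts : List (Int × Int)) :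
    add_start_end_build end_point pts
      = (pts.map (fun p => p.1) ++ [end_point.1], pts.map (fun p => p.2) ++ [end_point.2]) := by
  induction pts with
  | nil => simp [add_start_end_build]
  | cons h t ih => simp [add_start_end_build, ih]

-- ===== VERDICT =====
theorem add_start_end_spec : Claim_equal_add_start_end := by
  intro arc_list sp ep _
  unfold Spec_add_start_end add_start_end add_start_end_alt
  simp [add_start_end_foldl, add_start_end_build_eq]
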